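-- pv_equiv track=rewrite | github.com/a3813065/hacker-gamer.com.tw | 身分證計算.py | is_valid_taiwan_id
-- ===== SOURCE A (Python) =====
-- def is_valid_taiwan_id(id_number):
--     # 身分證的首字母對應的數字（戶籍地）
--     letters_map = {
--         'A': 10, 'B': 11, 'C': 12, 'D': 13, 'E': 14, 'F': 15, 'G': 16, 'H': 17,
--         'I': 34, 'J': 18, 'K': 19, 'L': 20, 'M': 21, 'N': 22, 'O': 35, 'P': 23,
--         'Q': 24, 'R': 25, 'S': 26, 'T': 27, 'U': 28, 'V': 29, 'W': 30, 'X': 31,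
--         'Y': 32, 'Z': 33
--     }
--
--     # 確認身分證號碼長度應為 10 個字元
--     if len(id_number) != 10:
--         return False
--
--     # 首字母轉換為對應的數字
--     letter = id_number[0].upper()
--     if letter not in letters_map:
--         return False
--     letter_number = letters_map[letter]
--
--     # 取得每一位數字，並計算加權和
--     digits = [int(x) for x in id_number[1:]]
--
--     # 按照給定規則計算 S
--     S = (letter_number // 10) + (letter_number % 10) * 9  # 戶籍碼部分
--     S += digits[0] * 8 + digits[1] * 7 + digits[2] * 6 + digits[3] * 5 + digits[4] * 4 + digits[5] * 3 + digits[6] * 2 + digits[7] * 1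
--
--     # 計算檢查碼
--     remainder = S % 10
--     check_digit = (10 - remainder) % 10
--
--     # 檢查是否與最後一位數字一致
--     if check_digit == digits[8]:
--         return True
--     else:
--         return False
-- ===== SOURCE B (Python) =====
-- def is_valid_taiwan_id(id_number):
--     letters_map = {
--         'A': 10, 'B': 11, 'C': 12, 'D': 13, 'E': 14, 'F': 15, 'G': 16, 'H': 17,
--         'I': 34, 'J': 18, 'K': 19, 'L': 20, 'M': 21, 'N': 22, 'O': 35, 'P': 23,
--         'Q': 24, 'R': 25, 'S': 26, 'T': 27, 'U': 28, 'V': 29, 'W': 30, 'X': 31,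
--         'Y': 32, 'Z': 33
--     }
--
--     if len(id_number) != 10:
--         return False
--
--     ln = letters_map.get(id_number[0].upper())
--     if ln is None:
--         return False
--
--     digits = [int(x) for x in id_number[1:]]
--
--     # ISBN-style double accumulator: after folding [ln % 10, d0..d7],
--     # s = 9*(ln%10) + 8*d0 + ... + 1*d7 with no multiplication at all
--     # (s accumulates running prefix totals, so each value is counted once
--     # per remaining step, which realises the decreasing weights 9..1).
--     t = 0
--     s = 0
--     for v in [ln % 10] + digits[:8]:
--         t += v
--         s += t
--     # valid iff the grand total, including the weight-1 parts, is divisible by 10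
--     return (s + ln // 10 + digits[8]) % 10 == 0
-- ===== Notes on version B (the rewrite author's own statement) =====
-- stated objective: alternative
-- what changed: B replaces A's multiply-and-add weighted checksum by an ISBN-style double-accumulator pass (a running prefix total added repeatedly realises the decreasing weights 9..1 with no multiplication) and tests divisibility of the grand total by 10 instead of deriving and comparing a check digit.
import Mathlib
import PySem

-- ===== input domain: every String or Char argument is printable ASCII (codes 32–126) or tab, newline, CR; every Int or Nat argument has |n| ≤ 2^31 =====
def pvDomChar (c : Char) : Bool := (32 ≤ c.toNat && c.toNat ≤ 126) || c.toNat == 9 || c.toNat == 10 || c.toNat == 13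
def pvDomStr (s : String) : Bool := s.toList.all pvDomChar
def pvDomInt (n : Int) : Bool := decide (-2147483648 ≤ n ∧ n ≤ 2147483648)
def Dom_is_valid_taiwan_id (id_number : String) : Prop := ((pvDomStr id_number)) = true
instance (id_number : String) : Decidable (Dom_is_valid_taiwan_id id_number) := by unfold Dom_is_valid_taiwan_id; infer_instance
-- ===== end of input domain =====

-- B replaces A's unrolled multiply-and-add check-digit comparison by an ISBN-style
-- double-accumulator pass (repeated prefix sums realise the weights, no multiplication)
-- tested for divisibility by 10; alternative decomposition, same cost.


-- ===== PORT A =====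
-- the letters_map dict literal (distinct keys; first-match lookup)
def pvLettersMap : List (Char × Int) :=
  [('A',10),('B',11),('C',12),('D',13),('E',14),('F',15),('G',16),('H',17),
   ('I',34),('J',18),('K',19),('L',20),('M',21),('N',22),('O',35),('P',23),
   ('Q',24),('R',25),('S',26),('T',27),('U',28),('V',29),('W',30),('X',31),
   ('Y',32),('Z',33)]

-- int(x) for the single character x (ValueError → excluded by Pre_, default never used there)
def pvDigit (x : Char) : Int := (PySem.Int.ofChars? [x]).getD 0

def pvCoreA (cs : List Char) : Bool :=
  if cs.length ≠ 10 then false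
  else
    let letter := PySem.Chars.upperChar ((PySem.List.pyGet? cs 0).getD ' ')
    match pvLettersMap.lookup letter with
    | none => false
    | some letter_number =>
      let digits : List Int := (PySem.List.slice cs (some 1) none).map pvDigit
      let S := PySem.Int.floordiv letter_number 10 + PySem.Int.mod letter_number 10 * 9
      let S := S + PySem.List.pyGetD digits 0 0 * 8 + PySem.List.pyGetD digits 1 0 * 7 +
        PySem.List.pyGetD digits 2 0 * 6 + PySem.List.pyGetD digits 3 0 * 5 +
        PySem.List.pyGetD digits 4 0 * 4 + PySem.List.pyGetD digits 5 0 * 3 +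
        PySem.List.pyGetD digits 6 0 * 2 + PySem.List.pyGetD digits 7 0 * 1
      let remainder := PySem.Int.mod S 10
      let check_digit := PySem.Int.mod (10 - remainder) 10
      if check_digit == PySem.List.pyGetD digits 8 0 then true else false

def is_valid_taiwan_id (id_number : String) : Bool := pvCoreA id_number.toList

-- ===== PORT B =====
def pvCoreB (cs : List Char) : Bool :=
  if cs.length ≠ 10 then false
  else
    match pvLettersMap.lookup (PySem.Chars.upperChar ((PySem.List.pyGet? cs 0).getD ' ')) with
    | none => false
    | some ln =>
      let digits : List Int := (PySem.List.slice cs (some 1) none).map pvDigit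
      -- double-accumulator loop: state (t, s); t += v; s += t
      let ts := ([PySem.Int.mod ln 10] ++ PySem.List.slice digits none (some 8)).foldl
        (fun (p : Int × Int) v => (p.1 + v, p.2 + (p.1 + v))) (0, 0)
      PySem.Int.mod (ts.2 + PySem.Int.floordiv ln 10 + PySem.List.pyGetD digits 8 0) 10 == 0

def is_valid_taiwan_id_alt (id_number : String) : Bool := pvCoreB id_number.toList

-- ===== PRECONDITION & SPEC =====
-- Pre_ excludes exactly the inputs on which A raises ValueError (length 10, valid first
-- letter, but a non-digit among the last nine characters); B raises there too.
def Pre_is_valid_taiwan_id (id_number : String) : Prop :=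
  (id_number.toList.length = 10 ∧
      (pvLettersMap.lookup (PySem.Chars.upperChar (id_number.toList.headD ' '))).isSome = true) →
    (id_number.toList.drop 1).all PySem.Chars.isdigit = true
instance (id_number : String) : Decidable (Pre_is_valid_taiwan_id id_number) := by
  unfold Pre_is_valid_taiwan_id; infer_instance

def pvWitness_is_valid_taiwan_id : String := "A123456789"

def Spec_is_valid_taiwan_id (id_number : String) (out : Bool) : Prop := out = is_valid_taiwan_id_alt id_number
instance (id_number : String) (out : Bool) : Decidable (Spec_is_valid_taiwan_id id_number out) := by unfold Spec_is_valid_taiwan_id; infer_instance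

-- ===== CLAIM (what is proved, stated in full; the proofs are below) =====
def Claim_equal_is_valid_taiwan_id : Prop := ∀ (id_number : String), Dom_is_valid_taiwan_id id_number → Pre_is_valid_taiwan_id id_number → Spec_is_valid_taiwan_id id_number (is_valid_taiwan_id id_number)

-- ===== LEMMAS AND PROOFS =====

-- a digit character is one of '0'..'9'
theorem pv_digit_enum (c : Char) (h : PySem.Chars.isdigit c = true) :
    c ∈ ['0','1','2','3','4','5','6','7','8','9'] := by
  simp only [PySem.Chars.isdigit, Bool.and_eq_true, decide_eq_true_eq] at h
  have h1 : 48 ≤ c.toNat := h.1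
  have h2 : c.toNat ≤ 57 := h.2
  have hofn : Char.ofNat c.toNat = c := Char.ofNat_toNat c
  have key : ∀ n : Nat, 48 ≤ n → n ≤ 57 →
      Char.ofNat n ∈ ['0','1','2','3','4','5','6','7','8','9'] := by
    intro n hn1 hn2; interval_cases n <;> decide
  rw [← hofn]; exact key _ h1 h2

-- a digit character's int value lies in [0, 9]
theorem pvDigit_bounds (c : Char) (h : PySem.Chars.isdigit c = true) :
    0 ≤ pvDigit c ∧ pvDigit c ≤ 9 := by
  have := pv_digit_enum c h
  fin_cases this <;> exact (by decide)

theorem pvCore_eq (cs : List Char)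
    (hpre : (cs.length = 10 ∧
        (pvLettersMap.lookup (PySem.Chars.upperChar (cs.headD ' '))).isSome = true) →
      (cs.drop 1).all PySem.Chars.isdigit = true) :
    pvCoreA cs = pvCoreB cs := by
  by_cases hl : cs.length = 10
  · rcases cs with _|⟨c0,_|⟨c1,_|⟨c2,_|⟨c3,_|⟨c4,_|⟨c5,_|⟨c6,_|⟨c7,_|⟨c8,_|⟨c9,_|⟨c10,cs⟩⟩⟩⟩⟩⟩⟩⟩⟩⟩⟩ <;>
        try (exfalso; simp only [List.length_cons, List.length_nil] at hl; omega)
    cases hLk : pvLettersMap.lookup (PySem.Chars.upperChar c0) with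
    | none =>
      simp [pvCoreA, pvCoreB, hLk]
    | some ln =>
      have hd : ∀ c ∈ [c1,c2,c3,c4,c5,c6,c7,c8,c9], PySem.Chars.isdigit c = true := by
        have := hpre ⟨by simp, by simp [hLk]⟩
        simpa [List.all_eq_true] using this
      have h9 := pvDigit_bounds c9 (hd c9 (by simp))
      simp only [pvCoreA, pvCoreB, PySem.List.pyGet?_zero_cons, hLk,
        PySem.List.slice_from_one, List.tail_cons, List.map_cons, List.map_nil,
        List.length_cons, List.length_nil, List.cons_append, List.nil_append,
        List.foldl_cons, Option.getD_some]
      norm_num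
      simp only [PySem.List.pyGetD_ofNat']
      simp [List.getD, PySem.List.slice]
      obtain ⟨h9a, h9b⟩ := h9
      rw [Bool.eq_iff_iff]
      simp only [decide_eq_true_eq, beq_iff_eq]
      omega
  · simp [pvCoreA, pvCoreB, hl]

-- ===== VERDICT (by name: the statement is the Claim_ definition above) =====
theorem is_valid_taiwan_id_spec : Claim_equal_is_valid_taiwan_id := by
  intro s _ hpre
  unfold Spec_is_valid_taiwan_id is_valid_taiwan_id is_valid_taiwan_id_alt
  exact pvCore_eq s.toList hpre
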